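-- pv_equiv track=rewrite | github.com/MartinWho2/Video_Processing | music_to_csv.py | order_mesure
-- ===== SOURCE A (Python) =====
-- def order_mesure(mesure:list):
--     mesure_copy = mesure[:]
--     pauses = [note[1] for note in mesure]
--     pauses = sorted(pauses)
--     sorted_mesure = []
--     for _ in range(len(mesure_copy)):
--         mesure_to_del = []
--         chord_list = []
--         for note in mesure_copy:
--             if note[1] == pauses[0]:
--                 chord_list.append(note)
--                 mesure_to_del.append(note)
--         for element in mesure_to_del:
--             del mesure_copy[mesure_copy.index(element)]
--         del pauses[0]
--         if chord_list:
--             sorted_mesure.append(chord_list)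
--     return sorted_mesure
-- ===== SOURCE B (Python) =====
-- def order_mesure(mesure: list):
--     groups = {}
--     for note in mesure:
--         groups.setdefault(note[1], []).append(note)
--     return [groups[k] for k in sorted(groups)]
-- ===== Notes on version B (the rewrite author's own statement) =====
-- stated objective: simpler
-- what changed: Replaces the quadratic rescan-and-delete loop (re-filtering and list.index-deleting a shrinking copy once per note) with one dict-grouping pass followed by emission in sorted-key order.
import Mathlib
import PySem

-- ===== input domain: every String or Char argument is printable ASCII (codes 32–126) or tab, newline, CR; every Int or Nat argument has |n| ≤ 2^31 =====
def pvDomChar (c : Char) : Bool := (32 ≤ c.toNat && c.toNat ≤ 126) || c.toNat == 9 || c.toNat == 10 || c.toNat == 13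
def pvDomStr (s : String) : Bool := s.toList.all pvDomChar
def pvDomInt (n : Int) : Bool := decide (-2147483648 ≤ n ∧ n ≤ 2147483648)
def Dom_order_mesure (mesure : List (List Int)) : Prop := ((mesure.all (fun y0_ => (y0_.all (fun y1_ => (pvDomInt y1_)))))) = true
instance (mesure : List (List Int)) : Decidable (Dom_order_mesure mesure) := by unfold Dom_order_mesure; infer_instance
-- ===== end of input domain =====

-- B replaces A's repeated rescan-and-delete over a shrinking copy by one dict-grouping
-- pass followed by emission in sorted-key order (same return value, proved below).

-- ===== PORT A =====
-- note[1]; exact under Pre_ (every note has length ≥ 2)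
def pvPause (note : List Int) : Int := PySem.List.pyGetD note 1 0

-- the 'for _ in range(len(mesure_copy))' loop, state = (mesure_copy, pauses, sorted_mesure);
-- chord_list and mesure_to_del are built identically by the inner loop, so one filter stands for both
def orderLoopA (n : Nat) (mc : List (List Int)) (ps : List Int)
    (out : List (List (List Int))) : List (List (List Int)) :=
  match n with
  | 0 => out
  | Nat.succ m =>
    let chord := mc.filter (fun note => pvPause note == PySem.List.pyGetD ps 0 0)
    -- 'for element in mesure_to_del: del mesure_copy[mesure_copy.index(element)]'
    let mc' := chord.foldl (fun acc e => (PySem.List.remove? acc e).getD acc) mc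
    orderLoopA m mc' (ps.drop 1) (if chord.isEmpty then out else out ++ [chord])

def order_mesure (mesure : List (List Int)) : List (List (List Int)) :=
  orderLoopA mesure.length mesure
    (PySem.List.sorted (mesure.map pvPause) (fun x => x) false) []

-- ===== PORT B =====
def order_mesure_alt (mesure : List (List Int)) : List (List (List Int)) :=
  let d := mesure.foldl
    (fun d note => PySem.Dict.modify d (pvPause note) [] (fun l => l ++ [note]))
    PySem.Dict.empty
  (PySem.List.sorted (PySem.Dict.keys d) (fun k => k) false).map
    (fun k => PySem.Dict.getD d k [])

-- ===== PRECONDITION & SPEC =====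
-- Pre_ excludes exactly the inputs on which Python A raises IndexError: a note shorter than 2 (note[1]).
def Pre_order_mesure (mesure : List (List Int)) : Prop :=
  ∀ note ∈ mesure, 2 ≤ note.length
instance (mesure : List (List Int)) : Decidable (Pre_order_mesure mesure) := by
  unfold Pre_order_mesure; infer_instance

def pvWitness_order_mesure : List (List Int) := [[60, 1], [62, 2], [64, 1]]

def Spec_order_mesure (mesure : List (List Int)) (out : List (List (List Int))) : Prop :=
  out = order_mesure_alt mesure
instance (mesure : List (List Int)) (out : List (List (List Int))) :
    Decidable (Spec_order_mesure mesure out) := by unfold Spec_order_mesure; infer_instance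

-- ===== CLAIM (what is proved, stated in full; the proofs are below) =====
def Claim_equal_order_mesure : Prop :=
  ∀ (mesure : List (List Int)), Dom_order_mesure mesure → Pre_order_mesure mesure →
    Spec_order_mesure mesure (order_mesure mesure)

-- ===== LEMMAS AND PROOFS =====

-- the group of notes with pause value k, in original order
def pvGroup (M : List (List Int)) (k : Int) : List (List Int) :=
  M.filter (fun n => pvPause n == k)

-- deleting (the first occurrence of) each element of `es` from `a :: t` skips `a`
-- when no element of `es` equals `a`
theorem foldRem_cons_of_ne (a : List Int) (t es : List (List Int))
    (h : ∀ e ∈ es, e ≠ a) :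
    es.foldl (fun acc e => (PySem.List.remove? acc e).getD acc) (a :: t)
      = a :: es.foldl (fun acc e => (PySem.List.remove? acc e).getD acc) t := by
  induction es generalizing t with
  | nil => rfl
  | cons e es ih =>
    simp only [List.foldl_cons]
    have hne : a ≠ e := fun hh => (h e (by simp)) hh.symm
    rw [PySem.List.remove?_cons_of_ne t hne]
    cases hr : PySem.List.remove? t e with
    | none =>
      simp only [Option.map_none, Option.getD_none]
      exact ih t (fun e' he' => h e' (by simp [he']))
    | some r =>
      simp only [Option.map_some, Option.getD_some]
      exact ih r (fun e' he' => h e' (by simp [he']))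

-- deleting each element of `mc.filter p` from `mc` leaves `mc.filter (!p ·)`
theorem foldRem_filter (p : List Int → Bool) (mc : List (List Int)) :
    (mc.filter p).foldl (fun acc e => (PySem.List.remove? acc e).getD acc) mc
      = mc.filter (fun n => !p n) := by
  induction mc with
  | nil => rfl
  | cons a t ih =>
    by_cases hp : p a = true
    · simp only [List.filter_cons, hp, if_pos, List.foldl_cons,
        PySem.List.remove?_cons_self, Option.getD_some]
      simpa [List.filter_cons, hp] using ih
    · have hf : p a = false := by simpa using hp
      simp only [List.filter_cons, hf, Bool.false_eq_true, if_false, Bool.not_false, if_true]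
      rw [foldRem_cons_of_ne a t (t.filter p)
        (fun e he hea => hp (hea ▸ List.of_mem_filter he)), ih]

-- PySem.Set.ofList xs (= PySem.List.dedup xs) is a sublist of xs
theorem ofList_sublist (xs : List Int) : (PySem.Set.ofList xs).Sublist xs := by
  induction xs with
  | nil => simp [PySem.Set.ofList_nil]
  | cons x t ih =>
    rw [PySem.Set.ofList_cons]
    exact List.Sublist.cons₂ x (List.Sublist.trans List.filter_sublist ih)

-- deduplicating a sorted list = sorting the deduplicated list
theorem sorted_ofList_eq_dedup_sorted (xs : List Int) :
    PySem.List.sorted (PySem.Set.ofList xs) (fun x => x) false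
      = PySem.List.dedup (PySem.List.sorted xs (fun x => x) false) := by
  apply PySem.List.sorted_eq_of_perm_of_pairwise_lt
  · rw [List.perm_ext_iff_of_nodup (PySem.List.nodup_dedup _) (PySem.Set.nodup_ofList _)]
    intro a
    simp [PySem.List.dedup, PySem.Set.mem_ofList, PySem.List.mem_sorted]
  · have h1 : (PySem.List.dedup (PySem.List.sorted xs (fun x => x) false)).Pairwise
        (fun a b : Int => a ≤ b) :=
      List.Pairwise.sublist (ofList_sublist _) (PySem.List.sorted_pairwise xs (fun x => x))
    have h2 := PySem.List.nodup_dedup (PySem.List.sorted xs (fun x => x) false)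
    exact (h1.and h2).imp (fun h => lt_of_le_of_ne h.1 h.2)

-- invariant of A's outer loop: with `pre` the keys already processed (a prefix of the
-- sorted pause list) and `ps` the remaining keys, the loop appends one group per
-- first occurrence of a key in `ps`
theorem loopA_spec (M : List (List Int)) :
    ∀ (ps pre : List Int),
      (∀ k ∈ ps, ∃ n ∈ M, pvPause n = k) →
      orderLoopA ps.length (M.filter (fun n => !(decide (pvPause n ∈ pre)))) ps
          ((PySem.List.dedup pre).map (pvGroup M))
        = (PySem.List.dedup (pre ++ ps)).map (pvGroup M) := by
  intro ps
  induction ps with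
  | nil => intro pre _; simp [orderLoopA]
  | cons k rest ih =>
    intro pre hk
    simp only [List.length_cons, orderLoopA, PySem.List.pyGetD_zero_cons, List.drop_one,
      List.tail_cons, List.filter_filter]
    by_cases hkpre : k ∈ pre
    · -- duplicate key: the chord is empty, nothing changes this iteration
      have hch : M.filter (fun n => (pvPause n == k) && !(decide (pvPause n ∈ pre))) = [] := by
        rw [List.filter_eq_nil_iff]
        intro n _
        by_cases h1 : pvPause n = k <;> simp [h1, hkpre]
      rw [hch]
      simp only [List.foldl_nil, List.isEmpty_nil, if_pos]
      have hmem : ∀ x : Int, (x ∈ pre ++ [k]) ↔ x ∈ pre := by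
        intro x
        simp only [List.mem_append, List.mem_singleton]
        exact ⟨fun h => h.elim id (fun hx => hx ▸ hkpre), Or.inl⟩
      have hded : PySem.List.dedup (pre ++ [k]) = PySem.List.dedup pre := by
        simp only [PySem.List.dedup, PySem.Set.ofList_append_singleton]
        exact PySem.Set.add_of_mem ((PySem.Set.mem_ofList pre k).mpr hkpre)
      have h := ih (pre ++ [k]) (fun k' hk' => hk k' (by simp [hk']))
      rw [List.append_cons, ← h, hded]
      congr 1
      exact List.filter_congr (fun n _ => by simp [hmem])
    · -- fresh key: the chord is exactly the group of k, and it is appended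
      have hch : M.filter (fun n => (pvPause n == k) && !(decide (pvPause n ∈ pre)))
          = M.filter (fun n => pvPause n == k) :=
        List.filter_congr (fun n _ => by
          by_cases h1 : pvPause n = k <;> simp [h1, hkpre])
      rw [hch]
      obtain ⟨n0, hn0M, hn0k⟩ := hk k (by simp)
      have hchne : M.filter (fun n => pvPause n == k) ≠ [] := by
        intro hz
        have : n0 ∈ M.filter (fun n => pvPause n == k) :=
          List.mem_filter.mpr ⟨hn0M, by simp [hn0k]⟩
        simp [hz] at this
      have hemp : (M.filter (fun n => pvPause n == k)).isEmpty = false := by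
        simpa [List.isEmpty_iff] using hchne
      simp only [hemp, Bool.false_eq_true, if_false]
      -- the fold deletes exactly the chord from mc
      have hrem := foldRem_filter (fun n => pvPause n == k)
        (M.filter (fun n => !(decide (pvPause n ∈ pre))))
      rw [List.filter_filter] at hrem
      rw [hch] at hrem
      rw [hrem, List.filter_filter]
      have hded : PySem.List.dedup (pre ++ [k]) = PySem.List.dedup pre ++ [k] := by
        simp only [PySem.List.dedup, PySem.Set.ofList_append_singleton]
        exact PySem.Set.add_of_not_mem (fun hm => hkpre ((PySem.Set.mem_ofList pre k).mp hm))
      have h := ih (pre ++ [k]) (fun k' hk' => hk k' (by simp [hk']))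
      have hsplit : pre ++ k :: rest = (pre ++ [k]) ++ rest := by simp
      rw [hsplit, ← h, hded]
      have hfe : List.filter (fun a => !pvPause a == k && !decide (pvPause a ∈ pre)) M
          = List.filter (fun n => !decide (pvPause n ∈ pre ++ [k])) M :=
        List.filter_congr (fun n _ => by
          by_cases h1 : pvPause n = k <;> by_cases h2 : pvPause n ∈ pre <;> simp [h1, h2])
      rw [hfe]
      simp [pvGroup]

-- characterisation of A's result
theorem order_mesure_eq (M : List (List Int)) :
    order_mesure M
      = (PySem.List.dedup (PySem.List.sorted (M.map pvPause) (fun x => x) false)).map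
          (pvGroup M) := by
  have h := loopA_spec M (PySem.List.sorted (M.map pvPause) (fun x => x) false) []
    (by
      intro k hkm
      have : k ∈ M.map pvPause := (PySem.List.mem_sorted _ _ _ _).mp hkm
      simpa [List.mem_map, eq_comm] using this)
  simpa [order_mesure, PySem.List.length_sorted, PySem.List.dedup, PySem.Set.ofList_nil]
    using h

-- characterisation of B's result
theorem order_mesure_alt_eq (M : List (List Int)) :
    order_mesure_alt M
      = (PySem.List.sorted (PySem.Set.ofList (M.map pvPause)) (fun x => x) false).map
          (pvGroup M) := by
  unfold order_mesure_alt
  have hfold : (M.foldl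
        (fun d note => PySem.Dict.modify d (pvPause note) [] (fun l => l ++ [note]))
        PySem.Dict.empty)
      = ((M.map (fun n => (pvPause n, n))).foldl
        (fun d p => PySem.Dict.modify d p.1 [] (fun l => l ++ [p.2]))
        PySem.Dict.empty) := by
    rw [List.foldl_map]
  have hkeys : (M.foldl
        (fun d note => PySem.Dict.modify d (pvPause note) [] (fun l => l ++ [note]))
        PySem.Dict.empty).keys = PySem.Set.ofList (M.map pvPause) := by
    rw [PySem.Dict.keys_foldl_modify_key M pvPause [] (fun _ x => fun l => l ++ [x])]
    simp [PySem.Dict.keys_empty, PySem.Set.update_nil_left]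
  have hget : ∀ k : Int, (M.foldl
        (fun d note => PySem.Dict.modify d (pvPause note) [] (fun l => l ++ [note]))
        PySem.Dict.empty).getD k [] = pvGroup M k := by
    intro k
    rw [hfold, PySem.Dict.getD_foldl_modify_append]
    simp [PySem.Dict.getD_empty, List.filter_map, List.map_map, pvGroup,
      Function.comp_def]
  simp only [hkeys, hget]

-- ===== VERDICT (by name: the statement is the Claim_ definition above) =====
theorem order_mesure_spec : Claim_equal_order_mesure := by
  unfold Claim_equal_order_mesure
  intro M _ _
  unfold Spec_order_mesure
  rw [order_mesure_eq, order_mesure_alt_eq, sorted_ofList_eq_dedup_sorted]
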